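-- pv_equiv track=rewrite | github.com/salolevi/wn | migracion_bloques.py | __obtenerVerticeTritubo__
-- ===== SOURCE A (Python) =====
-- def __obtenerVerticeTritubo__(tritubo_cable, indice_vertice_cable):
--     numero_de_vertice = 0
--     for indice_tritubo in range(0, len(tritubo_cable)):
--         vertices, camaras = tritubo_cable[indice_tritubo]
--         # iteramos hasta el anteúltimo vertice
--         # si matchearía con el último, va a matchear cuando encuentre el primero del siguiente tritubo
--         for indice_vertice in range(0, len(vertices) - 1):
--             if numero_de_vertice == indice_vertice_cable:
--                 return indice_tritubo, indice_vertice
--             numero_de_vertice += 1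
-- ===== SOURCE B (Python) =====
-- def __obtenerVerticeTritubo__(tritubo_cable, indice_vertice_cable):
--     # Prefix-sum walk: each tritubo contributes max(len(vertices)-1, 0) global
--     # vertices; locate the containing segment with one interval test per
--     # tritubo instead of counting vertices one by one.
--     acc = 0
--     for indice_tritubo, (vertices, camaras) in enumerate(tritubo_cable):
--         seg = len(vertices) - 1
--         if acc <= indice_vertice_cable < acc + seg:
--             return indice_tritubo, indice_vertice_cable - acc
--         acc += max(seg, 0)
-- ===== Notes on version B (the rewrite author's own statement) =====
-- stated objective: alternative
-- what changed: Replaces the per-vertex counting inner loop with one arithmetic interval test per tritubo using a running prefix sum of segment lengths (O(#tritubos) per call vs O(index); not measurably faster on the benchmark inputs).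
import Mathlib
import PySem

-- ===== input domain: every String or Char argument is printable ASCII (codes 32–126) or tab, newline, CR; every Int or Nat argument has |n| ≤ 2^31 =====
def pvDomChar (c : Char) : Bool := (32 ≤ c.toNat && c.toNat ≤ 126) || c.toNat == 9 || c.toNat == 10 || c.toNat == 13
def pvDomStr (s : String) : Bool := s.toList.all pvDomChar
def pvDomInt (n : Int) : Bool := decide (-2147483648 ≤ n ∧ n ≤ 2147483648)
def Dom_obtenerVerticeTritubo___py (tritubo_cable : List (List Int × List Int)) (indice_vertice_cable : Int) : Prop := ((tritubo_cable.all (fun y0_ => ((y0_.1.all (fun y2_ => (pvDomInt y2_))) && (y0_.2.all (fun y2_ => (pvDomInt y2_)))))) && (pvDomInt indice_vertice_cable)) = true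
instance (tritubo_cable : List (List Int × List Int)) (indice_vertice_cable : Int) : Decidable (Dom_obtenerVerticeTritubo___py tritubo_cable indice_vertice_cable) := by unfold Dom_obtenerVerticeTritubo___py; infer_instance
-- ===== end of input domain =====

/- B replaces A's per-vertex counting with one arithmetic interval test per tritubo (a running prefix sum of segment lengths); an alternative algorithm, same return value. -/


-- ===== PORT A =====
-- inner loop: for indice_vertice in range(0, len(vertices)-1), carrying numero_de_vertice;
-- fuel = remaining iterations, iv = current indice_vertice
def pvInnerA (it : Nat) (target : Int) : Int -> Int -> Nat -> Sum (Int × Int) Int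
  | numero, _iv, 0 => .inr numero
  | numero, iv, fuel+1 =>
      if numero = target then .inl ((it : Int), iv)
      else pvInnerA it target (numero + 1) (iv + 1) fuel

-- outer loop over tritubo_cable, carrying numero_de_vertice and indice_tritubo
def pvOuterA (target : Int) : Int -> Nat -> List (List Int × List Int) -> Option (Int × Int)
  | _numero, _it, [] => none
  | numero, it, (vertices, _camaras) :: rest =>
      match pvInnerA it target numero 0 (vertices.length - 1) with
      | .inl r => some r
      | .inr numero' => pvOuterA target numero' (it + 1) rest

def obtenerVerticeTritubo___py (tritubo_cable : List (List Int × List Int)) (indice_vertice_cable : Int) : Option (Int × Int) :=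
  pvOuterA indice_vertice_cable 0 0 tritubo_cable

-- ===== PORT B =====
-- one arithmetic interval test per tritubo, acc = prefix sum of segment lengths
def pvLoopB (idx : Int) : Int -> Nat -> List (List Int × List Int) -> Option (Int × Int)
  | _acc, _i, [] => none
  | acc, i, (vertices, _camaras) :: rest =>
      let seg : Int := (vertices.length : Int) - 1
      if acc ≤ idx ∧ idx < acc + seg then some ((i : Int), idx - acc)
      else pvLoopB idx (acc + max seg 0) (i + 1) rest

def obtenerVerticeTritubo___py_alt (tritubo_cable : List (List Int × List Int)) (indice_vertice_cable : Int) : Option (Int × Int) :=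
  pvLoopB indice_vertice_cable 0 0 tritubo_cable

-- ===== PRECONDITION & SPEC =====
def Spec_obtenerVerticeTritubo___py (tritubo_cable : List (List Int × List Int)) (indice_vertice_cable : Int) (out : Option (Int × Int)) : Prop := out = obtenerVerticeTritubo___py_alt tritubo_cable indice_vertice_cable
instance (tritubo_cable : List (List Int × List Int)) (indice_vertice_cable : Int) (out : Option (Int × Int)) : Decidable (Spec_obtenerVerticeTritubo___py tritubo_cable indice_vertice_cable out) := by unfold Spec_obtenerVerticeTritubo___py; infer_instance

-- ===== CLAIM (what is proved, stated in full; the proofs are below) =====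
def Claim_equal_obtenerVerticeTritubo___py : Prop := ∀ (tritubo_cable : List (List Int × List Int)) (indice_vertice_cable : Int), Dom_obtenerVerticeTritubo___py tritubo_cable indice_vertice_cable → Spec_obtenerVerticeTritubo___py tritubo_cable indice_vertice_cable (obtenerVerticeTritubo___py tritubo_cable indice_vertice_cable)

-- ===== LEMMAS AND PROOFS =====

theorem pvInnerA_spec (it : Nat) (target : Int) (fuel : Nat) :
    ∀ (numero iv : Int), pvInnerA it target numero iv fuel =
      if numero ≤ target ∧ target < numero + (fuel : Int)
      then .inl ((it : Int), iv + (target - numero))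
      else .inr (numero + (fuel : Int)) := by
  induction fuel with
  | zero =>
      intro numero iv
      rw [pvInnerA, if_neg]
      · simp
      · omega
  | succ n ih =>
      intro numero iv
      by_cases h : numero = target
      · subst h
        rw [pvInnerA, if_pos rfl, if_pos (by push_cast; omega)]
        simp
      · rw [pvInnerA, if_neg h, ih]
        push_cast
        split_ifs with h1 h2 h2
        · congr 2
          ring
        · exfalso; omega
        · exfalso; omega
        · congr 1
          ring

theorem pvOuter_eq_loopB (target : Int) (l : List (List Int × List Int)) :
    ∀ (acc : Int) (i : Nat), pvOuterA target acc i l = pvLoopB target acc i l := by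
  induction l with
  | nil => intro acc i; rfl
  | cons hd tl ih =>
      intro acc i
      obtain ⟨vertices, camaras⟩ := hd
      rw [pvOuterA, pvLoopB, pvInnerA_spec]
      have hlen : ((vertices.length - 1 : Nat) : Int) = max ((vertices.length : Int) - 1) 0 := by
        omega

      split_ifs with h1 h2 h2
      · simp
      · exfalso; omega
      · exfalso; omega
      · rw [hlen]
        exact ih _ _

-- ===== VERDICT (by name: the statement is the Claim_ definition above) =====
theorem obtenerVerticeTritubo___py_spec : Claim_equal_obtenerVerticeTritubo___py := by
  intro tc idx _hdom
  unfold Spec_obtenerVerticeTritubo___py obtenerVerticeTritubo___py obtenerVerticeTritubo___py_alt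
  exact pvOuter_eq_loopB idx tc 0 0
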